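-- pv_equiv track=rewrite | github.com/AshleyLab/ukbb | anna_code/transition_states/get_number_transition_states.py | get_number_transition_states
-- ===== SOURCE A (Python) =====
-- def get_number_transition_states(data):
--     num_transitions=0
--     if len(data)==0:
--         return num_transitions
--     last_elem=data[0]
--     for elem in data[1::]:
--         if elem!=last_elem:
--             num_transitions+=1
--         last_elem=elem
--     return num_transitions
-- ===== SOURCE B (Python) =====
-- def get_number_transition_states(data):
--     # divide and conquer: transitions in data[lo:hi] =
--     # transitions in each half + 1 if the boundary pair differs
--     def trans(lo, hi):
--         if hi - lo < 2:
--             return 0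
--         mid = (lo + hi) // 2
--         return trans(lo, mid) + trans(mid, hi) + (1 if data[mid - 1] != data[mid] else 0)
--     return trans(0, len(data))
-- ===== Notes on version B (the rewrite author's own statement) =====
-- stated objective: alternative
-- what changed: Replaces the single accumulator pass with a divide-and-conquer recursion: transitions(lo,hi) = transitions of each half plus one if the boundary pair differs, no last_elem state carried.
import Mathlib
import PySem

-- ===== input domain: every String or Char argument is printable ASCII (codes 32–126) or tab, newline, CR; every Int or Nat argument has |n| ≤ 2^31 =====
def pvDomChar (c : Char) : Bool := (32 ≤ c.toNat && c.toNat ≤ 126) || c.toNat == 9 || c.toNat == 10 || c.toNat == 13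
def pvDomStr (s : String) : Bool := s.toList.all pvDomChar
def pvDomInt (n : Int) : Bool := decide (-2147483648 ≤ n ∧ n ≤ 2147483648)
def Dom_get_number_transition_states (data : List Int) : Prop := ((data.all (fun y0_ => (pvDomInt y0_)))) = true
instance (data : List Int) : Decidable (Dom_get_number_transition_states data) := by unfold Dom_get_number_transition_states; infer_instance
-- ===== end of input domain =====

-- B counts transitions by divide and conquer (halves plus boundary comparison) instead of A's accumulator pass; alternative decomposition, same O(n) cost.

-- ===== PORT A =====
-- A: accumulator loop carrying (num_transitions, last_elem) over data[1:]
def get_number_transition_states (data : List Int) : Int :=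
  if data.length = 0 then 0
  else
    match data with
    | [] => 0
    | last_elem :: rest =>
      (rest.foldl (fun (st : Int × Int) elem =>
        ((if elem ≠ st.2 then st.1 + 1 else st.1), elem)) ((0 : Int), last_elem)).1

-- ===== PORT B =====
-- trans(lo,hi) on data[lo:hi], rendered on the sublist itself: split at the midpoint,
-- recurse on both halves, add 1 if the boundary pair differs.
def pvTrans (xs : List Int) : Int :=
  if h : xs.length < 2 then 0
  else
    let m := xs.length / 2
    pvTrans (xs.take m) + pvTrans (xs.drop m) +
      (if xs[m - 1]? ≠ xs[m]? then 1 else 0)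
termination_by xs.length
decreasing_by
  · simp only [List.length_take]; omega
  · simp only [List.length_drop]; omega

def get_number_transition_states_alt (data : List Int) : Int :=
  pvTrans data

-- ===== PRECONDITION & SPEC =====
def Spec_get_number_transition_states (data : List Int) (out : Int) : Prop := out = get_number_transition_states_alt data
instance (data : List Int) (out : Int) : Decidable (Spec_get_number_transition_states data out) := by unfold Spec_get_number_transition_states; infer_instance

-- ===== CLAIM (what is proved, stated in full; the proofs are below) =====
def Claim_equal_get_number_transition_states : Prop := ∀ (data : List Int), Dom_get_number_transition_states data → Spec_get_number_transition_states data (get_number_transition_states data)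

-- ===== LEMMAS AND PROOFS =====

-- linear adjacent-pair count, the common reference for both proofs
def pvAdj : List Int → Int
  | a :: b :: t => (if a = b then 0 else 1) + pvAdj (b :: t)
  | _ => 0

lemma pvAdj_append (l r : List Int) (hl : l ≠ []) (hr : r ≠ []) :
    pvAdj (l ++ r) = pvAdj l + pvAdj r + (if l.getLast? ≠ r.head? then 1 else 0) := by
  induction l with
  | nil => exact absurd rfl hl
  | cons a t ih =>
    cases t with
    | nil =>
      cases r with
      | nil => exact absurd rfl hr
      | cons b s => simp [pvAdj]; split <;> simp_all <;> ring
    | cons b t' =>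
      have := ih (by simp) 
      simp only [List.cons_append, pvAdj] at *
      rw [this]
      simp [List.getLast?_cons_cons]
      ring

lemma pvTrans_eq_adj (xs : List Int) : pvTrans xs = pvAdj xs := by
  induction xs using pvTrans.induct with
  | case1 xs h =>
    rw [pvTrans]
    simp only [h, dif_pos]
    match xs, h with
    | [], _ => rfl
    | [a], _ => rfl
  | case2 xs h m ih1 ih2 =>
    rw [pvTrans]
    simp only [h]
    rw [ih1, ih2]
    have hm1 : 1 ≤ m := by simp only [m]; omega
    have hm2 : m < xs.length := by simp only [m]; omega
    have hsplit : xs.take m ++ xs.drop m = xs := List.take_append_drop m xs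
    have hl : xs.take m ≠ [] := by
      rw [Ne, List.take_eq_nil_iff]
      push Not
      constructor
      · omega
      · intro hc; rw [hc] at hm2; simp at hm2
    have hr : xs.drop m ≠ [] := by
      rw [Ne, List.drop_eq_nil_iff]; omega
    have hlast : (xs.take m).getLast? = xs[m - 1]? := by
      rw [List.getLast?_eq_getElem?]
      have hlen : (xs.take m).length = m := by simp [List.length_take]; omega
      rw [hlen, List.getElem?_take_of_lt (by omega)]
    have hhead : (xs.drop m).head? = xs[m]? := by
      rw [List.head?_eq_getElem?]; simp
    calc pvAdj (xs.take m) + pvAdj (xs.drop m) + (if xs[m - 1]? ≠ xs[m]? then 1 else 0)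
        = pvAdj (xs.take m) + pvAdj (xs.drop m)
            + (if (xs.take m).getLast? ≠ (xs.drop m).head? then 1 else 0) := by
          rw [hlast, hhead]
      _ = pvAdj (xs.take m ++ xs.drop m) := by rw [pvAdj_append _ _ hl hr]
      _ = pvAdj xs := by rw [hsplit]

lemma pvFoldl_eq_adj (rest : List Int) : ∀ (last c : Int),
    (rest.foldl (fun (st : Int × Int) elem =>
        ((if elem ≠ st.2 then st.1 + 1 else st.1), elem)) (c, last)).1
      = c + pvAdj (last :: rest) := by
  induction rest with
  | nil => intro last c; simp [pvAdj]
  | cons e t ih =>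
    intro last c
    simp only [List.foldl_cons]
    rw [ih]
    by_cases h : e = last <;> simp [pvAdj, h, eq_comm] <;> ring

-- ===== VERDICT (by name: the statement is the Claim_ definition above) =====
theorem get_number_transition_states_spec : Claim_equal_get_number_transition_states := by
  intro data _
  unfold Spec_get_number_transition_states get_number_transition_states get_number_transition_states_alt
  rw [pvTrans_eq_adj]
  match data with
  | [] => rfl
  | x :: t =>
    have h := pvFoldl_eq_adj t x 0
    simp only [List.length_cons, Nat.succ_ne_zero]
    rw [h]
    simp
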